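-- pv_equiv track=rewrite | github.com/lisun85/MA_Agents | backend/summarizer/summarizer.py | _format_media_content
-- ===== SOURCE A (Python) =====
-- def _format_media_content(content: str) -> str:
--     """
--     Format media content for better readability.
--
--     Args:
--         content: Raw content to format
--
--     Returns:
--         Formatted content string
--     """
--     # Remove excessive newlines
--     formatted = '\n'.join(line for line in content.splitlines() if line.strip())
--
--     # Break content into paragraphs for readability
--     paragraphs = []
--     current_paragraph = []
--
--     for line in formatted.splitlines():
--         if not line.strip():
--             if current_paragraph:
--                 paragraphs.append(' '.join(current_paragraph))
--                 current_paragraph = []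
--         else:
--             current_paragraph.append(line.strip())
--
--     # Add the last paragraph if it exists
--     if current_paragraph:
--         paragraphs.append(' '.join(current_paragraph))
--
--     # Join paragraphs with double newlines for readability
--     return '\n\n'.join(paragraphs)
-- ===== SOURCE B (Python) =====
-- def _format_media_content(content: str) -> str:
--     return ' '.join(line.strip() for line in content.splitlines() if line.strip())
-- ===== Notes on version B (the rewrite author's own statement) =====
-- stated objective: simpler
-- what changed: A's blank-line paragraph branch is dead (the filtered-and-rejoined text has no blank lines) and the join/re-splitlines round trip is a no-op, so B collapses the two phases to a single filter-strip-join pass over content.splitlines().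
import Mathlib
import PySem

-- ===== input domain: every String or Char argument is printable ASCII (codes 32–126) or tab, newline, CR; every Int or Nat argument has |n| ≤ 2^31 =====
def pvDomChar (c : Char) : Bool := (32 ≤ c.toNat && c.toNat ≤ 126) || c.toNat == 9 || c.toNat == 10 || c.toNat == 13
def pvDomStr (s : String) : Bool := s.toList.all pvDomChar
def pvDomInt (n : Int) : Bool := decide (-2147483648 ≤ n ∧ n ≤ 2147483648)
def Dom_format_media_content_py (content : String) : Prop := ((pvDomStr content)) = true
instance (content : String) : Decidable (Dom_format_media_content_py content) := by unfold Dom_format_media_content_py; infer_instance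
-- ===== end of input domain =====

-- B replaces A's two-phase rebuild (filter-join-resplit plus a dead paragraph accumulator) by a single filter-strip-join pass; objective: simpler.

-- ===== PORT A =====
-- literal transliteration of A on the List Char side (PySem.Chars = Python str semantics)
def format_media_content_py (content : String) : String :=
  -- formatted = '\n'.join(line for line in content.splitlines() if line.strip())
  let formatted : List Char :=
    PySem.Chars.join ['\n']
      ((PySem.Chars.splitlines content.toList).filter (fun l => !(PySem.Chars.strip l).isEmpty))
  -- paragraphs/current_paragraph loop over formatted.splitlines()
  let st :=
    (PySem.Chars.splitlines formatted).foldl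
      (fun (st : List (List Char) × List (List Char)) line =>
        if (PySem.Chars.strip line).isEmpty then
          if st.2.isEmpty then st else (st.1 ++ [PySem.Chars.join [' '] st.2], [])
        else (st.1, st.2 ++ [PySem.Chars.strip line]))
      ([], [])
  -- add the last paragraph if it exists
  let paragraphs := if st.2.isEmpty then st.1 else st.1 ++ [PySem.Chars.join [' '] st.2]
  String.ofList (PySem.Chars.join ['\n', '\n'] paragraphs)

-- ===== PORT B =====
-- ' '.join(line.strip() for line in content.splitlines() if line.strip())
def format_media_content_py_alt (content : String) : String :=
  String.ofList (PySem.Chars.join [' ']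
    (((PySem.Chars.splitlines content.toList).filter
        (fun l => !(PySem.Chars.strip l).isEmpty)).map PySem.Chars.strip))

-- ===== PRECONDITION & SPEC =====
def Spec_format_media_content_py (content : String) (out : String) : Prop := out = format_media_content_py_alt content
instance (content : String) (out : String) : Decidable (Spec_format_media_content_py content out) := by unfold Spec_format_media_content_py; infer_instance

-- ===== CLAIM (what is proved, stated in full; the proofs are below) =====
def Claim_equal_format_media_content_py : Prop := ∀ (content : String), Dom_format_media_content_py content → Spec_format_media_content_py content (format_media_content_py content)

-- ===== LEMMAS AND PROOFS =====

-- one step of splitlines.go on a cons cell that is not the '\r\n' pattern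
theorem go_cons_step (isB : Char → Bool) (c : Char) (rest cur : List Char) (acc : List (List Char))
    (hp : ∀ r : List Char, c = '\r' → rest = '\n' :: r → False) :
    PySem.Chars.splitlines.go isB (c :: rest) cur acc
      = if isB c then PySem.Chars.splitlines.go isB rest [] (cur.reverse :: acc)
        else PySem.Chars.splitlines.go isB rest (c :: cur) acc := by
  rw [PySem.Chars.splitlines.go.eq_def]
  split
  · rename_i heq; exact absurd heq (by simp)
  · rename_i heq
    injection heq with h2 h3
    exact (hp _ h2 h3).elim
  · rename_i heq
    injection heq with h2 h3
    subst h2 h3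
    rfl

-- a run of non-break characters is pushed onto cur one by one
theorem go_app (isB : Char → Bool) (hr : isB '\r' = true) (l : List Char)
    (h : ∀ c ∈ l, isB c = false) :
    ∀ (s cur : List Char) (acc : List (List Char)),
      PySem.Chars.splitlines.go isB (l ++ s) cur acc
        = PySem.Chars.splitlines.go isB s (l.reverse ++ cur) acc := by
  induction l with
  | nil => intro s cur acc; simp
  | cons c cs ih =>
    intro s cur acc
    have hb : isB c = false := h c (by simp)
    have hc : c ≠ '\r' := fun hcc => by rw [hcc] at hb; rw [hr] at hb; cases hb
    rw [List.cons_append, go_cons_step isB c (cs ++ s) cur acc (fun r hcc _ => hc hcc), hb]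
    simp only [Bool.false_eq_true, if_false]
    rw [ih (fun d hd => h d (by simp [hd])) s (c :: cur) acc]
    simp

-- splitting the '\n'-join of nonempty, break-free lines gives the lines back
theorem go_join (isB : Char → Bool) (hn : isB '\n' = true) (hr : isB '\r' = true) :
    ∀ (lines : List (List Char)),
      (∀ l ∈ lines, l ≠ [] ∧ ∀ c ∈ l, isB c = false) →
      ∀ (acc : List (List Char)),
        PySem.Chars.splitlines.go isB (PySem.Chars.join ['\n'] lines) [] acc
          = acc.reverse ++ lines := by
  intro lines
  induction lines with
  | nil =>
    intro _ acc
    rw [PySem.Chars.join_nil, PySem.Chars.splitlines.go.eq_def]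
    simp
  | cons l rest ih =>
    intro h acc
    have hl := h l (by simp)
    cases rest with
    | nil =>
      rw [PySem.Chars.join_singleton]
      have := go_app isB hr l hl.2 [] [] acc
      simp only [List.append_nil] at this
      rw [this, PySem.Chars.splitlines.go.eq_def]
      have : l.reverse.isEmpty = false := by
        simp; exact hl.1
      simp [this]
    | cons l' rest' =>
      rw [PySem.Chars.join_cons_cons]
      have happ := go_app isB hr l hl.2 ('\n' :: PySem.Chars.join ['\n'] (l' :: rest')) [] acc
      rw [show l ++ ['\n'] ++ PySem.Chars.join ['\n'] (l' :: rest')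
            = l ++ ('\n' :: PySem.Chars.join ['\n'] (l' :: rest')) by simp, happ]
      simp only [List.append_nil]
      rw [go_cons_step isB '\n' _ _ _ (fun r hcc _ => by cases hcc), hn]
      simp only [if_true]
      rw [ih (fun x hx => h x (by simp [hx])) (l.reverse.reverse :: acc)]
      simp

-- every line produced by splitlines.go is free of break characters
theorem go_mem (isB : Char → Bool) (s cur : List Char) (acc : List (List Char)) :
    (∀ l ∈ acc, ∀ c ∈ l, isB c = false) → (∀ c ∈ cur, isB c = false) →
    ∀ l ∈ PySem.Chars.splitlines.go isB s cur acc, ∀ c ∈ l, isB c = false := by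
  induction s, cur, acc using PySem.Chars.splitlines.go.induct (isB := isB) with
  | case1 cur acc hcur =>
    intro hacc _ l hl
    rw [PySem.Chars.splitlines.go.eq_def] at hl
    simp only [hcur, if_true] at hl
    exact hacc l (List.mem_reverse.mp hl)
  | case2 cur acc hcur =>
    intro hacc hc l hl
    rw [PySem.Chars.splitlines.go.eq_def] at hl
    simp only [] at hl
    rw [if_neg hcur] at hl
    rcases List.mem_cons.mp (List.mem_reverse.mp hl) with h | h
    · intro c hcl; exact hc c (List.mem_reverse.mp (h ▸ hcl))
    · exact hacc l h
  | case3 rest cur acc ih =>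
    intro hacc hc l hl
    rw [PySem.Chars.splitlines.go.eq_def] at hl
    refine ih ?_ (by simp) l hl
    intro x hx
    rcases List.mem_cons.mp hx with h | h
    · intro c hcl; exact hc c (List.mem_reverse.mp (h ▸ hcl))
    · exact hacc x h
  | case4 c rest cur acc hp hb ih =>
    intro hacc hc l hl
    rw [go_cons_step isB c rest cur acc hp, hb] at hl
    simp only [if_true] at hl
    refine ih ?_ (by simp) l hl
    intro x hx
    rcases List.mem_cons.mp hx with h | h
    · intro d hdl; exact hc d (List.mem_reverse.mp (h ▸ hdl))
    · exact hacc x h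
  | case5 c rest cur acc hp hb ih =>
    intro hacc hc l hl
    have hb' : isB c = false := by simpa using hb
    rw [go_cons_step isB c rest cur acc hp, hb'] at hl
    simp only [Bool.false_eq_true, if_false] at hl
    refine ih hacc ?_ l hl
    intro d hd
    rcases List.mem_cons.mp hd with h | h
    · exact h ▸ hb'
    · exact hc d h

-- A's paragraph loop over all-nonblank lines just accumulates their strips
theorem loopA (L : List (List Char)) (h : ∀ l ∈ L, (PySem.Chars.strip l).isEmpty = false) :
    ∀ (ps cur : List (List Char)),
      (L.foldl
        (fun (st : List (List Char) × List (List Char)) line =>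
          if (PySem.Chars.strip line).isEmpty then
            if st.2.isEmpty then st else (st.1 ++ [PySem.Chars.join [' '] st.2], [])
          else (st.1, st.2 ++ [PySem.Chars.strip line]))
        (ps, cur))
      = (ps, cur ++ L.map PySem.Chars.strip) := by
  induction L with
  | nil => intro ps cur; simp
  | cons l rest ih =>
    intro ps cur
    have hl := h l (by simp)
    simp only [List.foldl_cons, hl, Bool.false_eq_true, if_false]
    rw [ih (fun x hx => h x (by simp [hx])) ps (cur ++ [PySem.Chars.strip l])]
    simp

-- the break predicate splitlines actually uses
theorem splitlines_eq_go (s : List Char) :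
    PySem.Chars.splitlines s
      = PySem.Chars.splitlines.go
          (fun c => decide (c.toNat = 10) || decide (c.toNat = 13) || decide (c.toNat = 11) ||
            decide (c.toNat = 12) || decide (c.toNat = 28) || decide (c.toNat = 29) ||
            decide (c.toNat = 30) || decide (c.toNat = 133) || decide (c.toNat = 8232) ||
            decide (c.toNat = 8233)) s [] [] := rfl

-- ===== VERDICT (by name: the statement is the Claim_ definition above) =====
theorem format_media_content_py_spec : Claim_equal_format_media_content_py := by
  intro content _
  unfold Spec_format_media_content_py format_media_content_py format_media_content_py_alt
  set isB : Char → Bool :=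
    (fun c => decide (c.toNat = 10) || decide (c.toNat = 13) || decide (c.toNat = 11) ||
      decide (c.toNat = 12) || decide (c.toNat = 28) || decide (c.toNat = 29) ||
      decide (c.toNat = 30) || decide (c.toNat = 133) || decide (c.toNat = 8232) ||
      decide (c.toNat = 8233)) with hisB
  have hn : isB '\n' = true := by rw [hisB]; decide
  have hr : isB '\r' = true := by rw [hisB]; decide
  set L1 : List (List Char) :=
    (PySem.Chars.splitlines content.toList).filter (fun l => !(PySem.Chars.strip l).isEmpty)
      with hL1
  have hmem : ∀ l ∈ L1, l ≠ [] ∧ ∀ c ∈ l, isB c = false := by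
    intro l hl
    rw [hL1, List.mem_filter] at hl
    constructor
    · intro hnil
      subst hnil
      simp [show PySem.Chars.strip ([] : List Char) = [] from rfl] at hl
    · intro c hc
      exact go_mem isB content.toList [] [] (by simp) (by simp) l
        (by rw [← splitlines_eq_go]; exact hl.1) c hc
  have hstrip : ∀ l ∈ L1, (PySem.Chars.strip l).isEmpty = false := by
    intro l hl
    rw [hL1, List.mem_filter] at hl
    simpa using hl.2
  -- re-splitting the joined nonblank lines recovers them
  have hsplit : PySem.Chars.splitlines (PySem.Chars.join ['\n'] L1) = L1 := by
    rw [splitlines_eq_go, go_join isB hn hr L1 hmem []]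
    simp
  simp only [hsplit]
  rw [loopA L1 hstrip [] []]
  simp only [List.nil_append]
  cases hL : L1.map PySem.Chars.strip with
  | nil => simp [PySem.Chars.join_nil]
  | cons p ps =>
    have : (p :: ps).isEmpty = false := rfl
    simp only [this, Bool.false_eq_true, if_false]
    rw [PySem.Chars.join_singleton]
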